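-- pv_equiv track=rewrite | github.com/ranmasal/ScouterBot | backend/llm_providers.py | generate
-- ===== SOURCE A (Python) =====
-- from typing import Dict, List, Optional
--
-- def generate(question: str, context: str, history: Optional[List[Dict]] = None) -> str:
--     # Extract the documents from context
--     lines = context.split("\n")
--     # Find document sections
--     docs = []
--     current_doc = []
--     for line in lines:
--         if line.startswith("[Document"):
--             if current_doc:
--                 docs.append("\n".join(current_doc))
--             current_doc = [line]
--         else:
--             current_doc.append(line)
--     if current_doc:
--         docs.append("\n".join(current_doc))
--
--     if not docs:
--         return "I found some relevant documents but couldn't extract the text properly."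
--
--     best_doc = docs[0]
--     # Extract the text after the header line
--     doc_lines = best_doc.split("\n")
--     header = doc_lines[0] if doc_lines else ""
--     text = "\n".join(doc_lines[1:]) if len(doc_lines) > 1 else best_doc
--
--     response = f"Based on {header}, here's what I found:\n\n{text[:1200]}"
--
--     if len(docs) > 1:
--         response += "\n\nAdditional relevant sources:\n"
--         for doc in docs[1:3]:
--             doc_lines = doc.split("\n")
--             header = doc_lines[0] if doc_lines else ""
--             text_preview = " ".join(doc_lines[1:3]) if len(doc_lines) > 1 else ""
--             response += f"- {header}: {text_preview[:150]}...\n"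
--
--     response += (
--         "\n\nNote: For more detailed and synthesized answers, "
--         "configure an LLM (Ollama for free local use, or OpenAI API key)."
--     )
--
--     return response
-- ===== SOURCE B (Python) =====
-- from typing import Dict, List, Optional
--
--
-- def _format(docs):
--     if not docs:
--         return "I found some relevant documents but couldn't extract the text properly."
--
--     best_doc = docs[0]
--     doc_lines = best_doc.split("\n")
--     header = doc_lines[0] if doc_lines else ""
--     text = "\n".join(doc_lines[1:]) if len(doc_lines) > 1 else best_doc
--
--     response = f"Based on {header}, here's what I found:\n\n{text[:1200]}"
--
--     if len(docs) > 1: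
--         response += "\n\nAdditional relevant sources:\n"
--         for doc in docs[1:3]:
--             doc_lines = doc.split("\n")
--             header = doc_lines[0] if doc_lines else ""
--             text_preview = " ".join(doc_lines[1:3]) if len(doc_lines) > 1 else ""
--             response += f"- {header}: {text_preview[:150]}...\n"
--
--     response += (
--         "\n\nNote: For more detailed and synthesized answers, "
--         "configure an LLM (Ollama for free local use, or OpenAI API key)."
--     )
--     return response
--
--
-- def generate(question: str, context: str, history: Optional[List[Dict]] = None) -> str:
--     # Two-phase grouping: locate the header lines first, then slice the line
--     # list between consecutive header positions.
--     lines = context.split("\n")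
--     header_idxs = [i for i, l in enumerate(lines) if l.startswith("[Document")]
--     if not header_idxs:
--         docs = ["\n".join(lines)]
--     else:
--         docs = []
--         if header_idxs[0] > 0:
--             docs.append("\n".join(lines[: header_idxs[0]]))
--         bounds = header_idxs + [len(lines)]
--         for a, b in zip(bounds, bounds[1:]):
--             docs.append("\n".join(lines[a:b]))
--     return _format(docs)
-- ===== Notes on version B (the rewrite author's own statement) =====
-- stated objective: alternative
-- what changed: The accumulator-and-flush single pass that builds document groups line by line is replaced by a two-phase scheme: first collect the indices of '[Document' header lines, then build each document by slicing the line list between consecutive header positions; the response formatting stays the same.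
import Mathlib
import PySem

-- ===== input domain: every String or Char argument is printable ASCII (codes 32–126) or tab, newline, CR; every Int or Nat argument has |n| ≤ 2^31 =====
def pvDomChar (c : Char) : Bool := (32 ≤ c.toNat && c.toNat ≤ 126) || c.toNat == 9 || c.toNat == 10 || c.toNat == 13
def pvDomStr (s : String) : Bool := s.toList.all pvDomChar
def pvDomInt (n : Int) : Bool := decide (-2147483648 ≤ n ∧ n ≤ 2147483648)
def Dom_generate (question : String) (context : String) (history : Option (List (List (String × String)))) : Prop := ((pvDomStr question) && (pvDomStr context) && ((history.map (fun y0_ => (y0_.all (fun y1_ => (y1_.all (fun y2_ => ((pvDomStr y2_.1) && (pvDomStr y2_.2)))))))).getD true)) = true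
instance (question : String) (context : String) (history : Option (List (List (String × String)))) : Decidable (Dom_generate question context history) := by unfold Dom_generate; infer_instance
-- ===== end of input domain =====

-- B replaces A's accumulator-and-flush grouping pass by a two-phase scheme (collect header
-- indices, then slice between consecutive headers); the response formatting is unchanged
-- (ported once as pvFormat, shared by both ports since the two Pythons contain the same code).

-- ===== PORT A =====
-- shared: the header test and the response-formatting tail (identical code in Source A and Source B)
def pvHeader (l : String) : Bool := PySem.Str.startswith l "[Document"

def pvFormat (docs : List String) : String :=
  if docs = [] then
    "I found some relevant documents but couldn't extract the text properly."
  else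
    let best := PySem.List.pyGetD docs 0 ""
    let docLines := (PySem.Str.split? best "\n").getD []
    let header := if docLines ≠ [] then PySem.List.pyGetD docLines 0 "" else ""
    let text := if 1 < docLines.length then
        PySem.Str.join "\n" (PySem.List.slice docLines (some 1) none)
      else best
    let response := "Based on " ++ header ++ ", here's what I found:\n\n" ++
      PySem.Str.slice text none (some 1200)
    let response := if 1 < docs.length then
        (PySem.List.slice docs (some 1) (some 3)).foldl (fun r doc =>
          let dls := (PySem.Str.split? doc "\n").getD []
          let h := if dls ≠ [] then PySem.List.pyGetD dls 0 "" else ""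
          let tp := if 1 < dls.length then
              PySem.Str.join " " (PySem.List.slice dls (some 1) (some 3))
            else ""
          r ++ "- " ++ h ++ ": " ++ PySem.Str.slice tp none (some 150) ++ "...\n")
          (response ++ "\n\nAdditional relevant sources:\n")
      else response
    response ++ "\n\nNote: For more detailed and synthesized answers, configure an LLM (Ollama for free local use, or OpenAI API key)."

-- A's grouping: one pass with a current-document accumulator, flushed at each header and at the end
def generate (question : String) (context : String) (history : Option (List (List (String × String)))) : String :=
  let lines := (PySem.Str.split? context "\n").getD []
  let st := lines.foldl (fun (st : List String × List String) line =>
      if pvHeader line then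
        ((if st.2 ≠ [] then st.1 ++ [PySem.Str.join "\n" st.2] else st.1), [line])
      else (st.1, st.2 ++ [line])) ([], [])
  let docs := if st.2 ≠ [] then st.1 ++ [PySem.Str.join "\n" st.2] else st.1
  pvFormat docs

-- ===== PORT B =====
-- B's grouping: header indices first, then slices between consecutive bounds
def generate_alt (question : String) (context : String) (history : Option (List (List (String × String)))) : String :=
  let lines := (PySem.Str.split? context "\n").getD []
  let headerIdxs := ((PySem.List.enumerate lines).filter (fun p => pvHeader p.2)).map (·.1)
  let docs :=
    if headerIdxs = [] then [PySem.Str.join "\n" lines]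
    else
      let bounds := headerIdxs ++ [PySem.List.len lines]
      (if 0 < PySem.List.pyGetD headerIdxs 0 0 then
        [PySem.Str.join "\n" (PySem.List.slice lines none (some (PySem.List.pyGetD headerIdxs 0 0)))]
      else []) ++
      (bounds.zip bounds.tail).map (fun p => PySem.Str.join "\n" (PySem.List.slice lines (some p.1) (some p.2)))
  pvFormat docs

-- ===== PRECONDITION & SPEC =====
def Spec_generate (question : String) (context : String) (history : Option (List (List (String × String)))) (out : String) : Prop := out = generate_alt question context history
instance (question : String) (context : String) (history : Option (List (List (String × String)))) (out : String) : Decidable (Spec_generate question context history out) := by unfold Spec_generate; infer_instance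

-- ===== CLAIM (what is proved, stated in full; the proofs are below) =====
def Claim_equal_generate : Prop := ∀ (question : String) (context : String) (history : Option (List (List (String × String)))), Dom_generate question context history → Spec_generate question context history (generate question context history)

-- ===== LEMMAS AND PROOFS =====

def pvGrp : List String → List (List String)
  | [] => []
  | l :: ls => (l :: ls.takeWhile (fun x => !pvHeader x)) :: pvGrp (ls.dropWhile (fun x => !pvHeader x))
termination_by ls => ls.length
decreasing_by simpa using Nat.lt_succ_of_le (List.length_dropWhile_le _ _)
def pvGrpA (cur : List String) : List String → List (List String)
  | [] => if cur = [] then [] else [cur]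
  | l :: ls => if pvHeader l then (if cur = [] then [] else [cur]) ++ pvGrpA [l] ls
               else pvGrpA (cur ++ [l]) ls
theorem pvGrp_cons (l : String) (ls : List String) :
    pvGrp (l :: ls) = (l :: ls.takeWhile (fun x => !pvHeader x)) :: pvGrp (ls.dropWhile (fun x => !pvHeader x)) := by
  rw [pvGrp]
theorem pvGrpA_cons_ne (ls : List String) : ∀ cur : List String, cur ≠ [] →
    pvGrpA cur ls = (cur ++ ls.takeWhile (fun x => !pvHeader x)) :: pvGrp (ls.dropWhile (fun x => !pvHeader x)) := by
  induction ls with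
  | nil => intro cur hc; simp [pvGrpA, hc, pvGrp]
  | cons l ls ih =>
    intro cur hc
    by_cases hl : pvHeader l
    · have h2 := ih [l] (by simp)
      simp [pvGrpA, hl, hc, List.takeWhile_cons, List.dropWhile_cons, h2, pvGrp_cons]
    · have h2 := ih (cur ++ [l]) (by simp)
      simp [pvGrpA, hl, List.takeWhile_cons, List.dropWhile_cons, h2]
theorem pvGrpA_nil (ls : List String) : pvGrpA [] ls = pvGrp ls := by
  cases ls with
  | nil => simp [pvGrpA, pvGrp]
  | cons l ls =>
    by_cases hl : pvHeader l <;>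
      simp [pvGrpA, hl, pvGrpA_cons_ne ls [l] (by simp), pvGrp_cons, List.takeWhile_cons, List.dropWhile_cons]
def pvStep (st : List String × List String) (line : String) : List String × List String :=
  if pvHeader line then
    ((if st.2 ≠ [] then st.1 ++ [PySem.Str.join "\n" st.2] else st.1), [line])
  else (st.1, st.2 ++ [line])
def pvFlush (st : List String × List String) : List String :=
  if st.2 ≠ [] then st.1 ++ [PySem.Str.join "\n" st.2] else st.1
theorem pvFoldA (ls : List String) : ∀ gs cur : List String,
    pvFlush (ls.foldl pvStep (gs, cur)) = gs ++ (pvGrpA cur ls).map (PySem.Str.join "\n") := by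
  induction ls with
  | nil =>
    intro gs cur
    by_cases hc : cur = [] <;> simp [pvGrpA, pvFlush, hc]
  | cons l ls ih =>
    intro gs cur
    by_cases hl : pvHeader l
    · have e : pvStep (gs, cur) l = ((if cur ≠ [] then gs ++ [PySem.Str.join "\n" cur] else gs), [l]) := by
        simp [pvStep, hl]
      rw [List.foldl_cons, e, ih]
      by_cases hc : cur = [] <;> simp [pvGrpA, hl, hc]
    · have e : pvStep (gs, cur) l = (gs, cur ++ [l]) := by simp [pvStep, hl]
      rw [List.foldl_cons, e, ih]
      simp [pvGrpA, hl]
def pvHIdxN (k : Nat) : List String → List Nat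
  | [] => []
  | l :: ls => (if pvHeader l then [k] else []) ++ pvHIdxN (k + 1) ls
def pvSliceSeqN (ls : List String) (bs : List Nat) : List (List String) :=
  (bs.zip bs.tail).map (fun p => (ls.drop p.1).take (p.2 - p.1))
theorem pvHIdxN_shift (ls : List String) : ∀ j k : Nat, pvHIdxN (j + k) ls = (pvHIdxN j ls).map (· + k) := by
  induction ls with
  | nil => intro j k; simp [pvHIdxN]
  | cons l ls ih =>
    intro j k
    have := ih (j + 1) k
    by_cases hl : pvHeader l <;> simp [pvHIdxN, hl] <;>
      simpa [Nat.add_right_comm j k 1] using this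
theorem pvHIdxN_nil_iff (ls : List String) : ∀ k, pvHIdxN k ls = [] ↔ ∀ l ∈ ls, pvHeader l = false := by
  induction ls with
  | nil => intro k; simp [pvHIdxN]
  | cons l ls ih =>
    intro k
    by_cases hl : pvHeader l <;> simp [pvHIdxN, hl, ih]
theorem pvHIdxN_append_nh (p : List String) (q : List String)
    (hp : ∀ l ∈ p, pvHeader l = false) : ∀ k, pvHIdxN k (p ++ q) = pvHIdxN (k + p.length) q := by
  induction p with
  | nil => intro k; simp
  | cons l p ih =>
    intro k
    have hl : pvHeader l = false := hp l (by simp)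
    have := ih (fun x hx => hp x (by simp [hx])) (k + 1)
    simp only [List.cons_append, pvHIdxN, hl, Bool.false_eq_true, if_false, List.nil_append, this,
      List.length_cons]
    ring_nf
theorem pvSliceSeqN_shift (u v : List String) (bs : List Nat) :
    pvSliceSeqN (u ++ v) (bs.map (· + u.length)) = pvSliceSeqN v bs := by
  unfold pvSliceSeqN
  rw [show (bs.map (· + u.length)).tail = bs.tail.map (· + u.length) by cases bs <;> simp]
  rw [List.zip_map, List.map_map]
  apply List.map_congr_left
  intro p hp
  simp only [Function.comp_apply, Prod.map_fst, Prod.map_snd]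
  rw [show p.2 + u.length - (p.1 + u.length) = p.2 - p.1 by omega,
      List.drop_append, show p.1 + u.length - u.length = p.1 by omega,
      List.drop_of_length_le (by omega)]
  simp
theorem pvSliceSeqN_cons₂ (ls : List String) (b0 b1 : Nat) (bs : List Nat) :
    pvSliceSeqN ls (b0 :: b1 :: bs) = (ls.drop b0).take (b1 - b0) :: pvSliceSeqN ls (b1 :: bs) := by
  simp [pvSliceSeqN]
theorem pvSlice_grp_aux : ∀ n (ls : List String), ls.length ≤ n → ∀ (h : ls ≠ []),
    pvHeader (ls.head h) = true →
    pvSliceSeqN ls (pvHIdxN 0 ls ++ [ls.length]) = pvGrp ls := by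
  intro n
  induction n with
  | zero => intro ls hn h; simp at hn; exact absurd hn h
  | succ n ih =>
    rintro (_ | ⟨hd, rest⟩) hn h hh
    · exact absurd rfl h
    simp only [List.head_cons] at hh
    set p := rest.takeWhile (fun x => !pvHeader x) with hp
    set q := rest.dropWhile (fun x => !pvHeader x) with hq
    have hrest : p ++ q = rest := List.takeWhile_append_dropWhile
    have hpnh : ∀ l ∈ p, pvHeader l = false := by
      intro l hl
      have := List.mem_takeWhile_imp hl
      simpa using this
    have hIdx : pvHIdxN 0 (hd :: rest) = 0 :: pvHIdxN (1 + p.length) q := by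
      rw [show (hd :: rest) = hd :: (p ++ q) by rw [hrest]]
      simp only [pvHIdxN, hh, if_true, List.singleton_append]
      rw [pvHIdxN_append_nh p q hpnh 1]
    have hls : hd :: rest = (hd :: p) ++ q := by simp [hrest]
    cases hq' : q with
    | nil =>
      have hrp : rest = p := by rw [← hrest, hq', List.append_nil]
      have hptw : List.takeWhile (fun x => !pvHeader x) p = p :=
        List.takeWhile_eq_self_iff.mpr (fun x hx => by simp [hpnh x hx])
      have hpdw : List.dropWhile (fun x => !pvHeader x) p = [] :=
        List.dropWhile_eq_nil_iff.mpr (fun x hx => by simp [hpnh x hx])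
      rw [hIdx, hq']
      simp only [pvHIdxN, List.nil_append]
      rw [pvSliceSeqN]
      simp [hrp, pvGrp_cons, hptw, hpdw, pvGrp]
    | cons h' q' =>
      have hh' : pvHeader h' = true := by
        have := List.head?_dropWhile_not (fun x => !pvHeader x) rest
        rw [← hq, hq'] at this
        simpa using this
      have hIdxq : pvHIdxN (1 + p.length) q = (1 + p.length) :: pvHIdxN (1 + p.length + 1) q' := by
        rw [hq']; simp [pvHIdxN, hh']
      have hshift : pvHIdxN (1 + p.length + 1) q' = (pvHIdxN 1 q').map (· + (1 + p.length)) := by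
        have := pvHIdxN_shift q' 1 (1 + p.length)
        rw [← this]; ring_nf
      have hulen : (hd :: p).length = 1 + p.length := by simp [Nat.add_comm]
      have hlen : (hd :: rest).length = q.length + (1 + p.length) := by
        rw [← hrest]; simp; omega
      rw [hIdx, hIdxq]
      simp only [List.cons_append]
      rw [pvSliceSeqN_cons₂]
      have htake : ((hd :: rest).drop 0).take (1 + p.length - 0) = hd :: p := by
        rw [List.drop_zero, hls, Nat.sub_zero, ← hulen, List.take_left]
      have hxs : pvHIdxN (1 + p.length + 1) q' = (pvHIdxN (0 + 1) q').map (· + (1 + p.length)) := by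
        rw [hshift]
      have hne : q ≠ [] := by rw [hq']; simp
      have hheadq : q.head hne = h' := by
        rw [List.head_eq_iff_head?_eq_some, hq']
        rfl
      have hmap : ((1 + p.length) :: (pvHIdxN (1 + p.length + 1) q' ++ [(hd :: rest).length]))
          = (pvHIdxN 0 q ++ [q.length]).map (· + (hd :: p).length) := by
        rw [hq']
        simp only [pvHIdxN, hh', if_true, List.singleton_append, List.map_cons, List.map_append,
          List.map_nil, List.cons_append, hulen]
        refine List.cons_eq_cons.mpr ⟨by omega, congrArg₂ _ hxs ?_⟩
        have : (hd :: rest).length = (h' :: q').length + (1 + p.length) := by rw [← hq']; exact hlen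
        rw [this]
      have htail : pvSliceSeqN (hd :: rest) ((1 + p.length) :: (pvHIdxN (1 + p.length + 1) q' ++ [(hd :: rest).length]))
          = pvGrp q := by
        rw [hmap, hls, pvSliceSeqN_shift]
        refine ih q ?_ hne ?_
        · have h1 : q.length ≤ rest.length := by
            rw [hq]; exact List.length_dropWhile_le _ _
          simp at hn; omega
        · rw [hheadq]; exact hh'
      rw [htake, htail, pvGrp_cons, ← hp, ← hq]
theorem pvGo_ne (sep : List Char) : ∀ fuel (l cur : List Char) (acc : List (List Char)),
    PySem.Chars.splitOn.go sep fuel l cur acc ≠ [] := by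
  intro fuel
  induction fuel with
  | zero => intro l cur acc; rw [PySem.Chars.splitOn.go]; simp
  | succ n ih =>
    intro l cur acc
    cases l with
    | nil =>
      rw [PySem.Chars.splitOn.go]
      simp
      omega
    | cons c rest =>
      rw [PySem.Chars.splitOn.go]
      split
      · exact ih _ _ _
      · exact ih _ _ _
theorem pvSplit_ne_nil (s : String) : (PySem.Str.split? s "\n").getD [] ≠ [] := by
  have h := pvGo_ne "\n".toList (s.toList.length + 1) s.toList [] []
  simp [PySem.Str.split?, PySem.Chars.split?, PySem.Chars.splitOn]
  intro hc
  exact h hc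
def pvNI (n : Nat) : Int := n
theorem pvHIdxI (ls : List String) : ∀ k : Nat,
    ((PySem.List.enumerate ls (pvNI k)).filter (fun p => pvHeader p.2)).map (·.1)
      = (pvHIdxN k ls).map pvNI := by
  induction ls with
  | nil => intro k; simp [PySem.List.enumerate, pvHIdxN]
  | cons l ls ih =>
    intro k
    have hcast : (pvNI k + 1) = pvNI (k + 1) := by simp [pvNI]
    rw [PySem.List.enumerate_cons]
    by_cases hl : pvHeader l
    · simp only [List.filter_cons, hl, if_true, List.map_cons, hcast, ih (k + 1), pvHIdxN,
        List.singleton_append]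
    · simp only [List.filter_cons, hl, Bool.false_eq_true, if_false, hcast, ih (k + 1), pvHIdxN,
        List.nil_append]
theorem pvSliceI (ls : List String) : ∀ cbs : List Nat,
    (((cbs.map pvNI).zip (cbs.map pvNI).tail).map
        (fun p => PySem.Str.join "\n" (PySem.List.slice ls (some p.1) (some p.2))))
      = (pvSliceSeqN ls cbs).map (PySem.Str.join "\n") := by
  intro cbs
  induction cbs with
  | nil => simp [pvSliceSeqN]
  | cons b0 bs ih =>
    cases bs with
    | nil => simp [pvSliceSeqN]
    | cons b1 bs' =>
      simp only [List.map_cons, List.tail_cons, List.zip_cons_cons] at ih ⊢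
      rw [ih, pvSliceSeqN]
      simp only [List.map_cons, List.zip_cons_cons, List.tail_cons]
      congr 1
      show PySem.Str.join "\n" (PySem.List.slice ls (some (pvNI b0)) (some (pvNI b1))) = _
      rw [show pvNI b0 = ((b0 : Nat) : Int) from rfl, show pvNI b1 = ((b1 : Nat) : Int) from rfl,
        PySem.List.slice_natCast]

-- B's grouping expression, named for the proofs (identical to the docs term inside generate_alt)
def pvBDocs (ls : List String) : List String :=
  let headerIdxs := ((PySem.List.enumerate ls).filter (fun p => pvHeader p.2)).map (·.1)
  if headerIdxs = [] then [PySem.Str.join "\n" ls]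
  else
    let bounds := headerIdxs ++ [PySem.List.len ls]
    (if 0 < PySem.List.pyGetD headerIdxs 0 0 then
      [PySem.Str.join "\n" (PySem.List.slice ls none (some (PySem.List.pyGetD headerIdxs 0 0)))]
    else []) ++
    (bounds.zip bounds.tail).map (fun p => PySem.Str.join "\n" (PySem.List.slice ls (some p.1) (some p.2)))

theorem pvHIdxI0 (ls : List String) :
    ((PySem.List.enumerate ls).filter (fun p => pvHeader p.2)).map (·.1)
      = (pvHIdxN 0 ls).map pvNI := pvHIdxI ls 0

-- B's docs equal pvGrp (joined), for nonempty line lists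
theorem pvB_docs (ls : List String) (hne : ls ≠ []) :
    pvBDocs ls = (pvGrp ls).map (PySem.Str.join "\n") := by
  simp only [pvBDocs, pvHIdxI0]
  cases hcase : pvHIdxN 0 ls with
  | nil =>
    simp only [List.map_nil, if_pos rfl]
    have hall : ∀ l ∈ ls, pvHeader l = false := (pvHIdxN_nil_iff ls 0).mp hcase
    obtain ⟨l, ls', rfl⟩ := List.exists_cons_of_ne_nil hne
    have ht : List.takeWhile (fun x => !pvHeader x) ls' = ls' :=
      List.takeWhile_eq_self_iff.mpr (fun x hx => by simp [hall x (by simp [hx])])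
    have hd : List.dropWhile (fun x => !pvHeader x) ls' = [] :=
      List.dropWhile_eq_nil_iff.mpr (fun x hx => by simp [hall x (by simp [hx])])
    rw [pvGrp_cons, ht, hd]
    simp [pvGrp]
  | cons n0 t =>
    simp only [List.map_cons]
    rw [if_neg (by simp)]
    rw [show PySem.List.pyGetD (pvNI n0 :: List.map pvNI t) 0 0 = pvNI n0 from
      PySem.List.pyGetD_zero_cons _ _ _]
    have hb : (pvNI n0 :: List.map pvNI t) ++ [PySem.List.len ls]
        = ((n0 :: t) ++ [ls.length]).map pvNI := by
      simp [pvNI, PySem.List.len_eq]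
    rw [hb, pvSliceI ls ((n0 :: t) ++ [ls.length])]
    obtain ⟨l, ls', rfl⟩ := List.exists_cons_of_ne_nil hne
    by_cases hl : pvHeader l
    · -- first line is a header: n0 = 0, no leading group
      have h0 : (0 : Nat) :: pvHIdxN 1 ls' = n0 :: t := by
        rw [← hcase]; simp [pvHIdxN, hl]
      have hn0 : n0 = 0 := (List.cons_eq_cons.mp h0).1.symm
      rw [if_neg (by simp [hn0, pvNI]), List.nil_append, ← hcase]
      rw [pvSlice_grp_aux (l :: ls').length (l :: ls') le_rfl hne (by simpa using hl)]
    · -- leading non-header block, then the headers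
      set P := List.takeWhile (fun x => !pvHeader x) (l :: ls') with hP
      set Q := List.dropWhile (fun x => !pvHeader x) (l :: ls') with hQ
      have hPc : P = l :: List.takeWhile (fun x => !pvHeader x) ls' := by
        rw [hP, List.takeWhile_cons_of_pos (by simp [hl])]
      have hQc : Q = List.dropWhile (fun x => !pvHeader x) ls' := by
        rw [hQ, List.dropWhile_cons_of_pos (by simp [hl])]
      have hPQ : P ++ Q = l :: ls' := List.takeWhile_append_dropWhile
      have hPnh : ∀ x ∈ P, pvHeader x = false := by
        intro x hx
        have := List.mem_takeWhile_imp hx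
        simpa using this
      have hQne : Q ≠ [] := by
        intro hq0
        have hall : ∀ x ∈ (l :: ls'), pvHeader x = false := by
          intro x hx
          rw [← hPQ, hq0, List.append_nil] at hx
          exact hPnh x hx
        rw [(pvHIdxN_nil_iff _ 0).mpr hall] at hcase
        exact absurd hcase.symm (List.cons_ne_nil _ _)
      obtain ⟨h', q'', hQ'⟩ := List.exists_cons_of_ne_nil hQne
      have hh' : pvHeader h' = true := by
        have := List.head?_dropWhile_not (fun x => !pvHeader x) (l :: ls')
        rw [← hQ, hQ'] at this
        simpa using this
      have hidx : pvHIdxN 0 (l :: ls') = P.length :: pvHIdxN (P.length + 1) q'' := by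
        rw [← hPQ, pvHIdxN_append_nh P Q hPnh 0, hQ']
        simp [pvHIdxN, hh', Nat.add_comm]
      have hn0 : n0 = P.length := by
        rw [hcase] at hidx; exact (List.cons_eq_cons.mp hidx).1
      have ht : t = pvHIdxN (P.length + 1) q'' := by
        rw [hcase] at hidx; exact (List.cons_eq_cons.mp hidx).2
      have hPpos : 0 < P.length := by rw [hPc]; simp
      rw [if_pos (by simp [pvNI, hn0]; omega)]
      have hlead : PySem.List.slice (l :: ls') none (some (pvNI n0)) = P := by
        rw [show pvNI n0 = ((n0 : Nat) : Int) from rfl, PySem.List.slice_to_natCast, hn0,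
          ← hPQ, List.take_left]
      have hcbs : (n0 :: t) ++ [(l :: ls').length]
          = (pvHIdxN 0 Q ++ [Q.length]).map (· + P.length) := by
        rw [hQ']
        simp only [pvHIdxN, hh', if_true, List.singleton_append, List.map_cons, List.map_append,
          List.map_nil, List.cons_append, List.nil_append]
        refine List.cons_eq_cons.mpr ⟨by omega, ?_⟩
        refine congrArg₂ _ ?_ ?_
        · rw [ht]
          have := pvHIdxN_shift q'' 1 P.length
          rw [← this]
          ring_nf
        · have : (l :: ls').length = Q.length + P.length := by
            rw [← hPQ]; simp; omega
          rw [this, ← hQ']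
      have htail : pvSliceSeqN (l :: ls') ((n0 :: t) ++ [(l :: ls').length]) = pvGrp Q := by
        rw [hcbs, show (l :: ls') = P ++ Q from hPQ.symm, pvSliceSeqN_shift]
        refine pvSlice_grp_aux Q.length Q le_rfl hQne ?_
        have : Q.head hQne = h' := by
          rw [List.head_eq_iff_head?_eq_some, hQ']
          rfl
        rw [this]; exact hh'
      rw [hlead, htail, pvGrp_cons, ← hPc, ← hQc]
      simp

theorem pvA_eq (question context : String) (history : Option (List (List (String × String)))) :
    generate question context history
      = pvFormat ((pvGrp ((PySem.Str.split? context "\n").getD [])).map (PySem.Str.join "\n")) := by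
  have h := pvFoldA ((PySem.Str.split? context "\n").getD []) [] []
  rw [pvGrpA_nil, List.nil_append] at h
  show pvFormat (pvFlush (((PySem.Str.split? context "\n").getD []).foldl pvStep ([], []))) = _
  rw [h]

theorem pvB_eq (question context : String) (history : Option (List (List (String × String)))) :
    generate_alt question context history
      = pvFormat ((pvGrp ((PySem.Str.split? context "\n").getD [])).map (PySem.Str.join "\n")) := by
  show pvFormat (pvBDocs ((PySem.Str.split? context "\n").getD [])) = _
  rw [pvB_docs ((PySem.Str.split? context "\n").getD []) (pvSplit_ne_nil context)]

-- ===== VERDICT (by name: the statement is the Claim_ definition above) =====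
theorem generate_spec : Claim_equal_generate := by
  unfold Claim_equal_generate Spec_generate
  intro question context history _
  rw [pvA_eq question context history, pvB_eq question context history]
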